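-- pv_equiv track=rewrite | github.com/stuagano/Alpaca-StochRSI-EMA-Trading-Bot | backend/api/services/pnl_service.py | _calculate_streaks
-- ===== SOURCE A (Python) =====
-- from typing import Dict, List, Optional
--
-- def _calculate_streaks(trades: List[Dict]) -> tuple:
--     """Calculate current and maximum winning streaks"""
--     if not trades:
--         return 0, 0
--
--     current_streak = 0
--     max_streak = 0
--
--     for trade in trades:
--         if trade.get('pnl', 0) > 0:
--             current_streak += 1
--             max_streak = max(max_streak, current_streak)
--         else:
--             current_streak = 0
--
--     return current_streak, max_streak
-- ===== SOURCE B (Python) =====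
-- from typing import Dict, List, Optional
--
-- def _calculate_streaks(trades: List[Dict]) -> tuple:
--     """Run-length decomposition: split the win/loss sequence into maximal runs,
--     keep the lengths of the winning runs, then read both answers off that list."""
--     wins = [trade.get('pnl', 0) > 0 for trade in trades]
--     runs = []  # lengths of maximal winning runs, in order
--     rest = wins
--     while rest:
--         b = rest[0]
--         k = 1
--         while k < len(rest) and rest[k] == b:
--             k += 1
--         if b:
--             runs.append(k)
--         rest = rest[k:]
--     max_streak = max(runs, default=0)
--     current_streak = runs[-1] if wins and wins[-1] else 0
--     return current_streak, max_streak
-- ===== Notes on version B (the rewrite author's own statement) =====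
-- stated objective: alternative
-- what changed: Replaces A's single stateful fold carrying (current_streak, max_streak) by a run-length decomposition: the win/loss sequence is split into maximal runs, the lengths of the winning runs are collected, max_streak is their maximum (default 0) and current_streak is the last run's length if the sequence ends in a win.
import Mathlib
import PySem

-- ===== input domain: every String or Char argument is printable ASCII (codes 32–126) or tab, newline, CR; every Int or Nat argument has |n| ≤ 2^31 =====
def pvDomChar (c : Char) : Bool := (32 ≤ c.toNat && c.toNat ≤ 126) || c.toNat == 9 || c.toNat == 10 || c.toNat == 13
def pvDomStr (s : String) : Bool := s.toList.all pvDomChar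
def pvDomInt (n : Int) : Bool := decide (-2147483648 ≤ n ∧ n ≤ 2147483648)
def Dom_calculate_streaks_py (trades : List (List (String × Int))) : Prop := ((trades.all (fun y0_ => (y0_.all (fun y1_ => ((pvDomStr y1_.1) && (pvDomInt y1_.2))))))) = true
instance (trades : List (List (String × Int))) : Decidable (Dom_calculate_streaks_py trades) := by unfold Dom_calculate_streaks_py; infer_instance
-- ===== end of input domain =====

-- B replaces A's stateful fold by a run-length decomposition of the win/loss sequence (alternative decomposition, same cost).

-- ===== PORT A =====
-- trade.get('pnl', 0): the assoc list is the dict's items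
def pvPnlWin (trade : List (String × Int)) : Bool :=
  decide (0 < (PySem.Dict.ofList trade).getD "pnl" 0)

def calculate_streaks_py (trades : List (List (String × Int))) : Int × Int :=
  if trades = [] then (0, 0)
  else
    trades.foldl
      (fun (st : Int × Int) trade =>
        if pvPnlWin trade then (st.1 + 1, max st.2 (st.1 + 1)) else (0, st.2))
      (0, 0)

-- ===== PORT B =====
-- the outer while loop of Source B: lengths of the maximal winning runs, in order
def pvRuns : List Bool → List Int
  | [] => []
  | b :: rest =>
      -- k = length of the leading run (inner while), rest[k:] = dropWhile
      if b then (((rest.takeWhile (fun x => x == b)).length : Int) + 1) :: pvRuns (rest.dropWhile (fun x => x == b))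
      else pvRuns (rest.dropWhile (fun x => x == b))
termination_by l => l.length
decreasing_by
  all_goals
    have := List.length_dropWhile_le (fun x => x == b) rest
    simp only [List.length_cons]
    omega

def calculate_streaks_py_alt (trades : List (List (String × Int))) : Int × Int :=
  let wins := trades.map pvPnlWin
  let runs := pvRuns wins
  let max_streak := runs.foldl max 0          -- max(runs, default=0)
  let current_streak := if wins.getLast?.getD false then runs.getLast?.getD 0 else 0
  (current_streak, max_streak)

-- ===== PRECONDITION & SPEC =====
def Spec_calculate_streaks_py (trades : List (List (String × Int))) (out : Int × Int) : Prop := out = calculate_streaks_py_alt trades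
instance (trades : List (List (String × Int))) (out : Int × Int) : Decidable (Spec_calculate_streaks_py trades out) := by unfold Spec_calculate_streaks_py; infer_instance

-- ===== CLAIM (what is proved, stated in full; the proofs are below) =====
def Claim_equal_calculate_streaks_py : Prop := ∀ (trades : List (List (String × Int))), Dom_calculate_streaks_py trades → Spec_calculate_streaks_py trades (calculate_streaks_py trades)

-- ===== LEMMAS AND PROOFS =====

-- A's loop step, on the boolean win/loss sequence
def pvStep (st : Int × Int) (b : Bool) : Int × Int :=
  if b then (st.1 + 1, max st.2 (st.1 + 1)) else (0, st.2)

-- trailing true-run length, starting from a carried count c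
def pvCtail (c : Int) : List Bool → Int
  | [] => c
  | true :: w => pvCtail (c + 1) w
  | false :: w => pvCtail 0 w

-- maximal true-run length, starting from a carried count c
def pvMrun (c : Int) : List Bool → Int
  | [] => c
  | true :: w => pvMrun (c + 1) w
  | false :: w => max c (pvMrun 0 w)

theorem pvMrun_ge (w : List Bool) : ∀ c : Int, c ≤ pvMrun c w := by
  induction w with
  | nil => intro c; simp [pvMrun]
  | cons b w ih =>
    intro c
    cases b with
    | true => have := ih (c + 1); simp [pvMrun]; omega
    | false => simp [pvMrun]

-- A's fold computes (trailing run, max of m and max run)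
theorem pvFold_eq (w : List Bool) :
    ∀ c m : Int, 0 ≤ c → c ≤ m →
      w.foldl pvStep (c, m) = (pvCtail c w, max m (pvMrun c w)) := by
  induction w with
  | nil => intro c m _ h2; simp [pvCtail, pvMrun, max_eq_left h2]
  | cons b w ih =>
    intro c m h1 h2
    cases b with
    | true =>
      have h3 : c + 1 ≤ max m (c + 1) := le_max_right _ _
      have hih := ih (c + 1) (max m (c + 1)) (by omega) h3
      have habs : max (max m (c + 1)) (pvMrun (c + 1) w) = max m (pvMrun (c + 1) w) := by
        have := pvMrun_ge w (c + 1); omega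
      calc (true :: w).foldl pvStep (c, m) = w.foldl pvStep (c + 1, max m (c + 1)) := by
            simp [pvStep]
        _ = (pvCtail c (true :: w), max m (pvMrun c (true :: w))) := by
            rw [hih]; simp [pvCtail, pvMrun, habs]
    | false =>
      have hih := ih 0 m le_rfl (by omega)
      have habs : max m (max c (pvMrun 0 w)) = max m (pvMrun 0 w) := by omega
      calc (false :: w).foldl pvStep (c, m) = w.foldl pvStep (0, m) := by simp [pvStep]
        _ = (pvCtail c (false :: w), max m (pvMrun c (false :: w))) := by
            rw [hih]; simp [pvCtail, pvMrun, habs]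

theorem pvFoldMax_assoc (l : List Int) : ∀ a b : Int, l.foldl max (max a b) = max a (l.foldl max b) := by
  induction l with
  | nil => intro a b; simp
  | cons x l ih =>
    intro a b
    simp only [List.foldl_cons, max_assoc]
    exact ih a (max b x)

theorem pvCtail_append (l : List Bool) : ∀ c r, pvCtail c (l ++ r) = pvCtail (pvCtail c l) r := by
  induction l with
  | nil => intro c r; simp [pvCtail]
  | cons b l ih =>
    intro c r
    cases b <;> simp [pvCtail, ih]

theorem pvCtail_true (l : List Bool) (h : ∀ x ∈ l, x = true) :
    ∀ c : Int, pvCtail c l = c + l.length := by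
  induction l with
  | nil => intro c; simp [pvCtail]
  | cons b l ih =>
    intro c
    have hb : b = true := h b (by simp)
    subst hb
    have := ih (fun x hx => h x (by simp [hx])) (c + 1)
    simp [pvCtail, this]; omega

theorem pvCtail_false (l : List Bool) (h : ∀ x ∈ l, x = false) :
    ∀ c : Int, l ≠ [] → pvCtail c l = 0 := by
  induction l with
  | nil => intro c hc; simp at hc
  | cons b l ih =>
    intro c _
    have hb : b = false := h b (by simp)
    subst hb
    cases hl : l with
    | nil => simp [pvCtail]
    | cons y l' =>
      have := ih (fun x hx => h x (by simp [hx])) 0 (by simp [hl])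
      simp [pvCtail, ← hl, this]

theorem pvMrun_append_true (l : List Bool) (h : ∀ x ∈ l, x = true) :
    ∀ (c : Int) (r : List Bool), pvMrun c (l ++ r) = pvMrun (c + l.length) r := by
  induction l with
  | nil => intro c r; simp
  | cons b l ih =>
    intro c r
    have hb : b = true := h b (by simp)
    subst hb
    have := ih (fun x hx => h x (by simp [hx])) (c + 1) r
    simp only [List.cons_append, pvMrun, this, List.length_cons]
    congr 1
    push_cast
    omega

theorem pvMrun_append_false (l : List Bool) (h : ∀ x ∈ l, x = false) :
    ∀ (c : Int) (r : List Bool), l ≠ [] → pvMrun c (l ++ r) = max c (pvMrun 0 r) := by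
  induction l with
  | nil => intro c r hc; simp at hc
  | cons b l ih =>
    intro c r _
    have hb : b = false := h b (by simp)
    subst hb
    by_cases hl : l = []
    · subst hl; simp [pvMrun]
    · have hihl := ih (fun x hx => h x (by simp [hx])) 0 r hl
      simp only [List.cons_append, pvMrun, hihl]
      have := pvMrun_ge r 0
      omega

-- flushing the carried count against a list that does not start with true
theorem pvMrun_flush (r : List Bool) (k : Int) (hk : 0 ≤ k)
    (hr : r.head?.getD false = false) : pvMrun k r = max k (pvMrun 0 r) := by
  cases r with
  | nil => simp [pvMrun]; omega
  | cons x r' =>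
    have hx : x = false := by simpa using hr
    subst hx
    have := pvMrun_ge r' 0
    simp [pvMrun]
    omega

-- a sequence ending in a win has at least one winning run
theorem pvRuns_ne_nil (n : Nat) : ∀ w : List Bool, w.length ≤ n →
    w.getLast?.getD false = true → pvRuns w ≠ [] := by
  induction n with
  | zero =>
    intro w hw hlast
    have : w = [] := by cases w <;> simp_all
    subst this; simp at hlast
  | succ n ih =>
    intro w hw hlast
    cases hwc : w with
    | nil => subst hwc; simp at hlast
    | cons b rest =>
      subst hwc
      rw [pvRuns]
      cases b with
      | true => simp
      | false =>
        rw [if_neg (by simp)]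
        set t := rest.takeWhile (fun x => x == false) with ht
        set r := rest.dropWhile (fun x => x == false) with hr
        have hsplit : false :: rest = (false :: t) ++ r := by
          simp [ht, hr, List.takeWhile_append_dropWhile]
        have hall : ∀ x ∈ (false :: t), x = false := by
          intro x hx
          rcases List.mem_cons.mp hx with h | h
          · exact h
          · exact eq_of_beq (List.mem_takeWhile_imp (p := fun z => z == false) (l := rest)
              (by rw [← ht]; exact h))
        by_cases hrE : r = []
        · exfalso
          rw [hrE, List.append_nil] at hsplit
          rw [hsplit] at hlast
          have hne : (false :: t) ≠ [] := by simp
          rw [List.getLast?_eq_some_getLast hne] at hlast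
          have := hall _ (List.getLast_mem hne)
          simp [this] at hlast
        · have hlen : r.length ≤ n := by
            have h1 : r.length ≤ rest.length := by
              rw [hr]; exact List.length_dropWhile_le _ _
            simp only [List.length_cons] at hw
            omega
          have hgl : r.getLast? = some (r.getLast hrE) := List.getLast?_eq_some_getLast hrE
          have hlast' : r.getLast?.getD false = true := by
            rw [hsplit, List.getLast?_append, hgl] at hlast
            rw [hgl]
            simpa using hlast
          exact ih r hlen hlast'

-- B's three readings of the run list equal the ctail/mrun characterisation
theorem pvB_aux (n : Nat) : ∀ w : List Bool, w.length ≤ n →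
    ((if w.getLast?.getD false then (pvRuns w).getLast?.getD 0 else 0),
      (pvRuns w).foldl max 0) = (pvCtail 0 w, pvMrun 0 w) := by
  induction n with
  | zero =>
    intro w hw
    have : w = [] := by cases w <;> simp_all
    subst this; simp [pvRuns, pvCtail, pvMrun]
  | succ n ih =>
    intro w hw
    cases hwc : w with
    | nil => subst hwc; simp [pvRuns, pvCtail, pvMrun]
    | cons b rest =>
      subst hwc
      rw [pvRuns]
      set t := rest.takeWhile (fun x => x == b) with ht
      set r := rest.dropWhile (fun x => x == b) with hr
      have hsplit : b :: rest = (b :: t) ++ r := by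
        simp [ht, hr, List.takeWhile_append_dropWhile]
      have hallb : ∀ x ∈ (b :: t), x = b := by
        intro x hx
        rcases List.mem_cons.mp hx with h | h
        · exact h
        · exact eq_of_beq (List.mem_takeWhile_imp (p := fun z => z == b) (l := rest)
            (by rw [← ht]; exact h))
      have hlen : r.length ≤ n := by
        have h1 : r.length ≤ rest.length := by
          rw [hr]; exact List.length_dropWhile_le _ _
        simp only [List.length_cons] at hw
        omega
      have hflip : ∀ x c : Bool, (x == c) = false → x = !c := by decide
      have hhead : r ≠ [] → r.head?.getD false = !b := by
        intro hne
        have hne' : rest.dropWhile (fun x => x == b) ≠ [] := by rw [← hr]; exact hne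
        have hnb := List.head_dropWhile_not (fun x => x == b) hne'
        have hh : r.head? = some ((rest.dropWhile (fun x => x == b)).head hne') := by
          rw [hr]; exact List.head?_eq_some_head _
        rw [hh]
        simp only [Option.getD_some]
        exact hflip _ _ hnb
      have hIH := ih r hlen
      have hIH1 := congrArg Prod.fst hIH
      have hIH2 := congrArg Prod.snd hIH
      simp only at hIH1 hIH2
      cases b with
      | true =>
        -- w = (true :: t) ++ r, winning run of length k = t.length + 1
        have hct : pvCtail 0 ((true :: t) ++ r) = pvCtail ((t.length : Int) + 1) r := by
          rw [pvCtail_append, pvCtail_true (true :: t) hallb 0]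
          simp
        have hmr : pvMrun 0 ((true :: t) ++ r) = pvMrun ((t.length : Int) + 1) r := by
          rw [pvMrun_append_true (true :: t) hallb 0 r]
          simp
        simp only [reduceIte]
        rw [hsplit, hct, hmr]
        by_cases hrE : r = []
        · -- whole sequence is one winning run
          have hne : (true :: t) ≠ [] := by simp
          have hlast : (true :: t).getLast?.getD false = true := by
            rw [List.getLast?_eq_some_getLast hne]
            simpa using hallb _ (List.getLast_mem hne)
          rw [hrE]
          simp [pvRuns, pvCtail, pvMrun, hlast]
          omega
        · obtain ⟨y, r', hrc⟩ := List.exists_cons_of_ne_nil hrE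
          have hy : y = false := by
            have := hhead hrE
            rw [hrc] at this; simpa using this
          subst hy
          -- last of w is last of r
          have hlastw : ((true :: t) ++ r).getLast?.getD false = r.getLast?.getD false := by
            rw [List.getLast?_append, hrc]
            have h2 : (false :: r').getLast? = some ((false :: r').getLast (by simp)) :=
              List.getLast?_eq_some_getLast (by simp)
            simp [h2]
          rw [hlastw]
          have hctr : pvCtail ((t.length : Int) + 1) r = pvCtail 0 r := by
            rw [hrc]; simp [pvCtail]
          rw [Prod.mk.injEq]
          constructor
          · -- first component
            cases hlr : r.getLast?.getD false with
            | false =>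
              simp only [if_false, Bool.false_eq_true]
              rw [hctr, ← hIH1, hlr]
              simp
            | true =>
              simp only [if_pos]
              have hrun_ne : pvRuns r ≠ [] := pvRuns_ne_nil n r hlen hlr
              obtain ⟨z, zs, hz⟩ := List.exists_cons_of_ne_nil hrun_ne
              have hgl : (((t.length : Int) + 1) :: pvRuns r).getLast? = (pvRuns r).getLast? := by
                rw [hz, List.getLast?_cons_cons]
              rw [hgl, hctr, ← hIH1, hlr]
              simp
          · -- second component: foldl max 0 (k :: pvRuns r) = pvMrun k r
            have hflush : pvMrun ((t.length : Int) + 1) r = max ((t.length : Int) + 1) (pvMrun 0 r) :=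
              pvMrun_flush r _ (by omega) (by rw [hhead hrE]; simp)
            simp only [List.foldl_cons]
            have hmax0 : max (0 : Int) ((t.length : Int) + 1) = (t.length : Int) + 1 := by omega
            have hassoc := pvFoldMax_assoc (pvRuns r) ((t.length : Int) + 1) 0
            have hid : max ((t.length : Int) + 1) (0:Int) = (t.length : Int) + 1 := by omega
            rw [hid] at hassoc
            rw [hmax0, hassoc, hflush, hIH2]
      | false =>
        -- w = (false :: t) ++ r, a losing run then r
        rw [if_neg (by decide : ¬(false = true))]
        have hct : pvCtail 0 ((false :: t) ++ r) = pvCtail 0 r := by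
          rw [pvCtail_append, pvCtail_false (false :: t) hallb 0 (by simp)]
        have hmr : pvMrun 0 ((false :: t) ++ r) = pvMrun 0 r := by
          rw [pvMrun_append_false (false :: t) hallb 0 r (by simp)]
          have := pvMrun_ge r 0; omega
        rw [hsplit, hct, hmr]
        by_cases hrE : r = []
        · -- sequence ends in a loss
          have hne : (false :: t) ≠ [] := by simp
          have hlast : (false :: t).getLast?.getD false = false := by
            rw [List.getLast?_eq_some_getLast hne]
            simpa using hallb _ (List.getLast_mem hne)
          rw [hrE]
          simp [pvRuns, pvCtail, pvMrun, hlast]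
        · obtain ⟨y, r', hrc⟩ := List.exists_cons_of_ne_nil hrE
          have hlastw : ((false :: t) ++ r).getLast?.getD false = r.getLast?.getD false := by
            rw [List.getLast?_append, hrc]
            have h2 : (y :: r').getLast? = some ((y :: r').getLast (by simp)) :=
              List.getLast?_eq_some_getLast (by simp)
            simp [h2]
          rw [hlastw]
          exact hIH

theorem pvB_eq (w : List Bool) :
    ((if w.getLast?.getD false then (pvRuns w).getLast?.getD 0 else 0),
      (pvRuns w).foldl max 0) = (pvCtail 0 w, pvMrun 0 w) :=
  pvB_aux w.length w le_rfl

theorem pvFold_step_eq (trades : List (List (String × Int))) :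
    trades.foldl (fun (st : Int × Int) trade =>
        if pvPnlWin trade then (st.1 + 1, max st.2 (st.1 + 1)) else (0, st.2)) (0, 0)
      = (trades.map pvPnlWin).foldl pvStep (0, 0) := by
  rw [List.foldl_map]
  rfl

-- ===== VERDICT (by name: the statement is the Claim_ definition above) =====
theorem calculate_streaks_py_spec : Claim_equal_calculate_streaks_py := by
  intro trades _
  unfold Spec_calculate_streaks_py calculate_streaks_py calculate_streaks_py_alt
  cases htr : trades with
  | nil => simp [pvRuns]
  | cons t ts =>
    simp only [if_neg (by simp : ¬ (t :: ts) = [])]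
    rw [pvFold_step_eq, pvFold_eq ((t :: ts).map pvPnlWin) 0 0 le_rfl le_rfl]
    have hmax : max (0:Int) (pvMrun 0 ((t :: ts).map pvPnlWin)) = pvMrun 0 ((t :: ts).map pvPnlWin) := by
      have := pvMrun_ge ((t :: ts).map pvPnlWin) 0; omega
    rw [hmax, ← pvB_eq ((t :: ts).map pvPnlWin)]
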